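-- pv_equiv track=rewrite | github.com/timcera/swmmtoolbox | src/swmmtoolbox/swmmtoolbox.py | tupleSearch
-- ===== SOURCE A (Python) =====
-- from builtins import object, range, str, zip
--
-- def tupleSearch(findme, haystack):
--     """Partial search of list of tuples.
--
--     The "findme" argument is a tuple and this will find matches in "haystack"
--     which is a list of tuples of the same size as "findme".  An empty string as
--     an item in "findme" is used as a wildcard for that item when searching
--     "haystack".
--     """
--     match = []
--     for words in haystack:
--         testmatch = []
--         for i, j in zip(findme, words):
--             if not i:
--                 testmatch.append(True)
--                 continue
--             if i == j:
--                 testmatch.append(True)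
--                 continue
--             testmatch.append(False)
--         if all(testmatch):
--             match.append(words)
--     return match
-- ===== SOURCE B (Python) =====
-- def tupleSearch(findme, haystack):
--     """Partial search of list of tuples (staged-filtering version).
--
--     Instead of testing each tuple against the whole pattern, iterate over the
--     pattern's positions: each non-wildcard position filters the surviving
--     candidate list in one pass (keeping tuples too short to reach that
--     position, mirroring zip truncation).  Positions at or beyond the longest
--     tuple cannot eliminate anything, so the staged loop stops there.  Order
--     is preserved throughout.
--     """
--     survivors = list(haystack)
--     maxlen = max(map(len, haystack), default=0)
--     for i, v in enumerate(findme[:maxlen]):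
--         if v:
--             survivors = [w for w in survivors if i >= len(w) or w[i] == v]
--     return survivors
-- ===== Notes on version B (the rewrite author's own statement) =====
-- stated objective: alternative
-- what changed: B inverts the loop nesting: instead of an inner scan of the pattern for every tuple that collects booleans, B loops once over the pattern's positions (capped at the longest tuple's length, past which no position can eliminate anything) and lets each non-wildcard position filter the whole survivor list in a staged pass, tuples too short to reach that position surviving exactly as zip truncation dictates; no per-tuple boolean list is ever built.
import Mathlib
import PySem

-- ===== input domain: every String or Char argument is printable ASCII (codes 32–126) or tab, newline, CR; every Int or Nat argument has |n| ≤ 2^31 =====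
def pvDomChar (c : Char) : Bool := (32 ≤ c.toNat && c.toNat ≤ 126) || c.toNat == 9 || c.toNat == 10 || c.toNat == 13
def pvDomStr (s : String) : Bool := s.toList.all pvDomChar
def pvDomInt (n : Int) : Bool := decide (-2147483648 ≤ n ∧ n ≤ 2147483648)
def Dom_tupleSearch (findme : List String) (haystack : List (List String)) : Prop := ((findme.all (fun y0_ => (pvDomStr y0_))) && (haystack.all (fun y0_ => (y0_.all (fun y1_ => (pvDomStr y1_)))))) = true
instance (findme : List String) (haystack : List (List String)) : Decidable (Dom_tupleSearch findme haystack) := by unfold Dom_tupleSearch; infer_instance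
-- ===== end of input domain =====

-- B inverts the loop nesting: each non-wildcard pattern position filters the whole
-- survivor list in a staged pass (objective: alternative decomposition, same cost class).

-- ===== PORT A =====
def tupleSearch (findme : List String) (haystack : List (List String)) : List (List String) :=
  haystack.foldl
    (fun mtch words =>
      let testmatch :=
        (findme.zip words).foldl
          (fun tm p =>
            if p.1 = "" then tm ++ [true]
            else if p.1 = p.2 then tm ++ [true]
            else tm ++ [false]) []
      if testmatch.all id then mtch ++ [words] else mtch) []

-- ===== PORT B =====
-- Staged filtering: fold over the enumerated pattern (capped at the longest
-- tuple's length, past which no position can eliminate anything); every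
-- non-wildcard position narrows the survivor list with one filter pass.
def tupleSearch_alt (findme : List String) (haystack : List (List String)) : List (List String) :=
  let maxlen := (haystack.map List.length).foldl max 0
  (PySem.List.enumerate (findme.take maxlen) 0).foldl
    (fun survivors p =>
      if ¬ (p.2 = "") then
        survivors.filter (fun w =>
          decide ((w.length : Int) ≤ p.1) || decide (PySem.List.pyGetD w p.1 "" = p.2))
      else survivors)
    haystack

-- ===== PRECONDITION & SPEC =====
def Spec_tupleSearch (findme : List String) (haystack : List (List String)) (out : List (List String)) : Prop := out = tupleSearch_alt findme haystack
instance (findme : List String) (haystack : List (List String)) (out : List (List String)) : Decidable (Spec_tupleSearch findme haystack out) := by unfold Spec_tupleSearch; infer_instance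

-- ===== CLAIM (what is proved, stated in full; the proofs are below) =====
def Claim_equal_tupleSearch : Prop := ∀ (findme : List String) (haystack : List (List String)), Dom_tupleSearch findme haystack → Spec_tupleSearch findme haystack (tupleSearch findme haystack)

-- ===== LEMMAS AND PROOFS =====

-- A's inner boolean-collecting loop is the map of its branch value over the zip.
theorem ts_inner_eq_map (l : List (String × String)) (acc : List Bool) :
    l.foldl
      (fun tm p =>
        if p.1 = "" then tm ++ [true]
        else if p.1 = p.2 then tm ++ [true]
        else tm ++ [false]) acc
    = acc ++ l.map (fun p => (p.1 == "" || p.1 == p.2)) := by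
  induction l generalizing acc with
  | nil => simp
  | cons x xs ih =>
    simp only [List.foldl_cons, List.map_cons, ih]
    by_cases h1 : x.1 = "" <;> by_cases h2 : x.1 = x.2 <;> simp [h1, h2]

theorem all_iff_getElem {α : Type} (l : List α) (f : α → Bool) :
    l.all f = true ↔ ∀ (k : Nat) (hk : k < l.length), f l[k] = true := by
  rw [List.all_eq_true]
  constructor
  · intro h k hk; exact h _ (l.getElem_mem hk)
  · intro h x hx
    obtain ⟨k, hk, rfl⟩ := List.mem_iff_getElem.1 hx
    exact h k hk

-- A's keep-decision for one tuple equals the conjunction over all non-wildcard positions.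
theorem ts_keep_eq (findme words : List String) :
    ((findme.zip words).map (fun p => (p.1 == "" || p.1 == p.2))).all id
    = ((PySem.List.enumerate findme 0).filter (fun p => !(p.2 = ""))).all
        (fun p =>
          decide ((words.length : Int) ≤ p.1) || decide (PySem.List.pyGetD words p.1 "" = p.2)) := by
  rw [Bool.eq_iff_iff, List.all_map, all_iff_getElem, List.all_eq_true]
  simp only [Function.comp, List.getElem_zip, List.length_zip, Bool.or_eq_true,
    List.mem_filter, PySem.List.mem_enumerate_iff, Bool.not_eq_true', decide_eq_true_eq]
  constructor
  · rintro h p ⟨⟨k, hk, rfl⟩, hne⟩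
    simp only [zero_add]
    by_cases hw : words.length ≤ k
    · left; exact_mod_cast hw
    · right
      have hkw : k < words.length := by omega
      have h1 := h k (by omega)
      simp only [id, Bool.or_eq_true, beq_iff_eq] at h1
      simp only [decide_eq_false_iff_not] at hne
      rcases h1 with h1 | h1
      · exact absurd h1 hne
      · simp [PySem.List.pyGetD_natCast, List.getD_eq_getElem?_getD,
          List.getElem?_eq_getElem hkw, h1]
  · intro h k hk
    have hkf : k < findme.length := by omega
    have hkw : k < words.length := by omega
    simp only [id, Bool.or_eq_true, beq_iff_eq]
    by_cases hne : findme[k] = ""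
    · left; exact hne
    · right
      have h1 := h ((0 : Int) + k, findme[k]) ⟨⟨k, hkf, rfl⟩, by simpa using hne⟩
      rcases h1 with h1 | h1
      · exfalso
        simp only [zero_add] at h1
        have : (words.length : Int) ≤ (k : Int) := h1
        omega
      · simp only [zero_add, PySem.List.pyGetD_natCast,
          List.getD_eq_getElem?_getD, List.getElem?_eq_getElem hkw] at h1
        exact h1.symm

-- B's staged filters collapse into one filter whose predicate is the
-- conjunction over all non-wildcard positions.
theorem staged_filter (cs : List (Int × String)) (hs : List (List String)) :
    cs.foldl
      (fun survivors p =>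
        if ¬ (p.2 = "") then
          survivors.filter (fun w =>
            decide ((w.length : Int) ≤ p.1) || decide (PySem.List.pyGetD w p.1 "" = p.2))
        else survivors)
      hs
    = hs.filter (fun w =>
        (cs.filter (fun p => !(p.2 = ""))).all
          (fun p =>
            decide ((w.length : Int) ≤ p.1) || decide (PySem.List.pyGetD w p.1 "" = p.2))) := by
  induction cs generalizing hs with
  | nil => simp
  | cons c rest ih =>
    by_cases hc : c.2 = ""
    · rw [List.foldl_cons, if_neg (by simp [hc]), ih]
      simp [hc]
    · simp only [List.foldl_cons, if_pos hc, ih, List.filter_filter, List.filter_cons,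
        Bool.not_eq_true']
      rw [if_pos (by simpa using hc)]
      apply List.filter_congr
      intro w _
      simp [Bool.and_comm]

-- Every length in the list is bounded by the running foldl max.
theorem init_le_foldl_max (l : List Nat) (b : Nat) : b ≤ l.foldl max b := by
  induction l generalizing b with
  | nil => simp
  | cons x xs ih => exact le_trans (le_max_left b x) (ih _)

theorem len_le_foldl_max (l : List Nat) (b : Nat) (a : Nat) (ha : a ∈ l) :
    a ≤ l.foldl max b := by
  induction l generalizing b with
  | nil => cases ha
  | cons x xs ih =>
    rcases List.mem_cons.1 ha with rfl | h
    · exact le_trans (le_max_right b a) (init_le_foldl_max xs _)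
    · exact ih _ h

-- zip truncation: positions past the shorter list never matter.
theorem zip_take_of_le (l l' : List String) (n : Nat) (h : l'.length ≤ n) :
    l.zip l' = (l.take n).zip l' := by
  apply List.ext_getElem
  · simp; omega
  · intro i h1 h2
    simp [List.getElem_zip, List.getElem_take]

-- ===== VERDICT (by name: the statement is the Claim_ definition above) =====
theorem tupleSearch_spec : Claim_equal_tupleSearch := by
  intro findme haystack _
  unfold Spec_tupleSearch tupleSearch tupleSearch_alt
  rw [PySem.List.foldl_append_if, staged_filter]
  simp only [List.nil_append, List.map_id']
  apply List.filter_congr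
  intro words hw
  have hlen : words.length ≤ (haystack.map List.length).foldl max 0 :=
    len_le_foldl_max _ _ _ (List.mem_map_of_mem hw)
  rw [ts_inner_eq_map, List.nil_append,
    zip_take_of_le findme words _ hlen, ts_keep_eq]
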